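-- pv_equiv track=rewrite | github.com/dlruawo07/practice | 프로그래머스/1/86491. 최소직사각형/최소직사각형.py | solution
-- ===== SOURCE A (Python) =====
-- def solution(sizes):
--     w = 0
--     h = 0
--     for size in sizes:
--         if size[0] > size[1]:
--             size[0], size[1] = size[1], size[0]
--         if size[0] > w:
--             w = size[0]
--         if size[1] > h:
--             h = size[1]
--     return w * h
-- ===== SOURCE B (Python) =====
-- def solution(sizes):
--     def rect(cards):
--         # returns (largest short side, largest long side) among cards, floored at (0, 0)
--         if len(cards) <= 1:
--             if not cards:
--                 return (0, 0)
--             a, b = cards[0][0], cards[0][1]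
--             return (max(min(a, b), 0), max(a, b, 0))
--         mid = len(cards) // 2
--         w1, h1 = rect(cards[:mid])
--         w2, h2 = rect(cards[mid:])
--         return (max(w1, w2), max(h1, h2))
--     w, h = rect(sizes)
--     return w * h
-- ===== Notes on version B (the rewrite author's own statement) =====
-- stated objective: alternative
-- what changed: A's single fused loop with two running-maximum accumulators and an in-place swap is replaced by a divide-and-conquer recursion that splits the card list in halves, computes the (largest short side, largest long side) pair of each half, and merges them componentwise; B does not mutate its argument, the equivalence is about the return value only.
import Mathlib
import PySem

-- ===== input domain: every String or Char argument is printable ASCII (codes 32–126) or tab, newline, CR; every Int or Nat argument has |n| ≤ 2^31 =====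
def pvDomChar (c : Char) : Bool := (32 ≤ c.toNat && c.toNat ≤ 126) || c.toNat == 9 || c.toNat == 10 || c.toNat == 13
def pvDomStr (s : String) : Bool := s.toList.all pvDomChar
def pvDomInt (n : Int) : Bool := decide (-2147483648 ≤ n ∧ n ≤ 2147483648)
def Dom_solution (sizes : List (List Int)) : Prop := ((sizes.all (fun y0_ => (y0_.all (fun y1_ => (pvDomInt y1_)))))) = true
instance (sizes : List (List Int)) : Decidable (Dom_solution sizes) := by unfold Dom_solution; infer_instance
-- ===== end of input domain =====

-- B replaces A's fused accumulator loop by a divide-and-conquer recursion merging per-half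
-- (largest short side, largest long side) pairs; same result, no mutation — A swaps row entries
-- in place, so the equivalence proved here is about the RETURN value only.

-- ===== PORT A =====
-- literal port of A's loop: conditional swap, then two conditional maximum updates
def solutionLoop : List (List Int) → Int → Int → Int
  | [], w, h => w * h
  | size :: rest, w, h =>
    match PySem.List.pyGet? size 0, PySem.List.pyGet? size 1 with
    | some a, some b =>
      -- if size[0] > size[1]: swap (in-place in Python; only the values matter for the result)
      let x := if a > b then b else a
      let y := if a > b then a else b
      solutionLoop rest (if x > w then x else w) (if y > h then y else h)
    | _, _ => 0  -- Python raises IndexError here (excluded by Pre_solution)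

def solution (sizes : List (List Int)) : Int := solutionLoop sizes 0 0

-- ===== PORT B =====
-- port of Source B's rect: divide and conquer on the card list
-- (cards[:mid] / cards[mid:] with 0 ≤ mid are exactly take/drop: slice_to_natCast / slice_from_natCast)
def rect (cards : List (List Int)) : Int × Int :=
  if _h : cards.length ≤ 1 then
    match cards with
    | [] => (0, 0)
    | s :: _ =>
      let a := (PySem.List.pyGet? s 0).getD 0   -- cards[0][0]; row shorter than 2 is excluded by Pre_solution
      let b := (PySem.List.pyGet? s 1).getD 0   -- cards[0][1]
      (max (min a b) 0, max (max a b) 0)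
  else
    let mid := cards.length / 2
    let p1 := rect (cards.take mid)
    let p2 := rect (cards.drop mid)
    (max p1.1 p2.1, max p1.2 p2.2)
termination_by cards.length
decreasing_by
  · simp only [List.length_take]; omega
  · simp only [List.length_drop]; omega

def solution_alt (sizes : List (List Int)) : Int :=
  let p := rect sizes
  p.1 * p.2

-- ===== PRECONDITION & SPEC =====
-- Pre_ excludes only rows with fewer than two entries, on which A raises IndexError.
def Pre_solution (sizes : List (List Int)) : Prop := ∀ s ∈ sizes, 2 ≤ s.length
instance (sizes : List (List Int)) : Decidable (Pre_solution sizes) := by unfold Pre_solution; infer_instance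

def pvWitness_solution : List (List Int) := [[60, 50], [30, 70], [60, 30], [80, 40]]

def Spec_solution (sizes : List (List Int)) (out : Int) : Prop := out = solution_alt sizes
instance (sizes : List (List Int)) (out : Int) : Decidable (Spec_solution sizes out) := by unfold Spec_solution; infer_instance

-- ===== CLAIM (what is proved, stated in full; the proofs are below) =====
def Claim_equal_solution : Prop := ∀ (sizes : List (List Int)), Dom_solution sizes → Pre_solution sizes → Spec_solution sizes (solution sizes)

-- ===== LEMMAS AND PROOFS =====

-- the short- and long-side maxima as left folds (the shape A's loop computes)
def shortFold (v : Int) (l : List (List Int)) : Int :=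
  l.foldl (fun acc s => max acc (min ((PySem.List.pyGet? s 0).getD 0) ((PySem.List.pyGet? s 1).getD 0))) v
def longFold (v : Int) (l : List (List Int)) : Int :=
  l.foldl (fun acc s => max acc (max ((PySem.List.pyGet? s 0).getD 0) ((PySem.List.pyGet? s 1).getD 0))) v

-- A's loop computes the two maxima as independent folds.
lemma solutionLoop_eq_folds (sizes : List (List Int)) (hp : ∀ s ∈ sizes, 2 ≤ s.length) :
    ∀ w h : Int, solutionLoop sizes w h = shortFold w sizes * longFold h sizes := by
  induction sizes with
  | nil => intro w h; simp [solutionLoop, shortFold, longFold]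
  | cons s rest ih =>
    intro w h
    have hs : 2 ≤ s.length := hp s (by simp)
    obtain ⟨a, b, t, rfl⟩ : ∃ a b t, s = a :: b :: t := by
      match s, hs with
      | a :: b :: t, _ => exact ⟨a, b, t, rfl⟩
    have hrest : ∀ u ∈ rest, 2 ≤ u.length := fun u hu => hp u (by simp [hu])
    have h0 : PySem.List.pyGet? (a :: b :: t) (0 : Int) = some a := PySem.List.pyGet?_zero_cons _ _
    have h1 : PySem.List.pyGet? (a :: b :: t) (1 : Int) = some b :=
      PySem.List.pyGet?_ofNat _ _ (by simp)
    simp only [solutionLoop, shortFold, longFold, h0, h1, List.foldl_cons, Option.getD_some]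
    rw [ih hrest]
    unfold shortFold longFold
    congr 2
    · rw [max_def, min_def]; split_ifs <;> omega
    · rw [max_def, max_def]; split_ifs <;> omega

-- a max-style fold from a nonnegative seed splits off the seed
lemma foldl_max_shift (f : List Int → Int) (l : List (List Int)) :
    ∀ v : Int, 0 ≤ v →
      l.foldl (fun acc s => max acc (f s)) v = max v (l.foldl (fun acc s => max acc (f s)) 0) := by
  induction l with
  | nil => intro v hv; simpa using hv
  | cons s rest ih =>
    intro v hv
    simp only [List.foldl_cons]
    rw [ih (max v (f s)) (le_trans hv (le_max_left _ _)),
        ih (max 0 (f s)) (le_max_left _ _)]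
    omega

lemma foldl_max_nonneg (f : List Int → Int) (l : List (List Int)) :
    0 ≤ l.foldl (fun acc s => max acc (f s)) 0 := by
  induction l with
  | nil => simp
  | cons s rest ih =>
    simp only [List.foldl_cons]
    rw [foldl_max_shift f rest (max 0 (f s)) (le_max_left _ _)]
    omega

lemma foldl_max_append (f : List Int → Int) (l1 l2 : List (List Int)) :
    (l1 ++ l2).foldl (fun acc s => max acc (f s)) 0 =
      max (l1.foldl (fun acc s => max acc (f s)) 0) (l2.foldl (fun acc s => max acc (f s)) 0) := by
  rw [List.foldl_append, foldl_max_shift f l2 _ (foldl_max_nonneg f l1)]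

-- the divide-and-conquer recursion computes exactly those folds
lemma rect_eq_folds (cards : List (List Int)) :
    rect cards = (shortFold 0 cards, longFold 0 cards) := by
  induction cards using rect.induct with
  | case1 => rw [rect.eq_def]; simp [shortFold, longFold]
  | case2 s t h1 _ =>
    have ht : t = [] := by
      cases t with
      | nil => rfl
      | cons _ _ => simp at h1
    subst ht
    rw [rect.eq_def]
    simp only [shortFold, longFold, List.foldl_cons, List.foldl_nil]
    rw [dif_pos (by simp)]
    simp only [Prod.mk.injEq]
    constructor <;> omega
  | case3 x hx mid ih1 ih2 =>
    rw [rect.eq_def, dif_neg hx]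
    simp only [show mid = x.length / 2 from rfl] at ih1 ih2
    simp only [ih1, ih2]
    have hsplit : x = x.take (x.length / 2) ++ x.drop (x.length / 2) :=
      (List.take_append_drop _ x).symm
    have hsf : shortFold 0 x = max (shortFold 0 (x.take (x.length / 2))) (shortFold 0 (x.drop (x.length / 2))) := by
      conv_lhs => rw [hsplit]
      exact foldl_max_append _ _ _
    have hlf : longFold 0 x = max (longFold 0 (x.take (x.length / 2))) (longFold 0 (x.drop (x.length / 2))) := by
      conv_lhs => rw [hsplit]
      exact foldl_max_append _ _ _
    simp [hsf, hlf]

-- ===== VERDICT =====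
theorem solution_spec : Claim_equal_solution := by
  intro sizes _ hp
  unfold Spec_solution solution solution_alt
  rw [rect_eq_folds, solutionLoop_eq_folds sizes hp 0 0]
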